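-- pv_equiv track=rewrite | github.com/ApricityZ/HarvardCS50note | Lecture2/plates2.py | check_number_position
-- ===== SOURCE A (Python) =====
-- def check_number_position(s):
--     num_positions = [i for i, char in enumerate(s) if char.isdigit()]
--     # 简化判断条件,万物皆可作为判断条件Bool值
--     if num_positions:
--         first_num_pos = num_positions[0]
--         last_num_pos = num_positions[-1]
--         # 不需要区分数字的个数
--         if s[first_num_pos] == "0" or (last_num_pos != len(s) - 1) or not is_numbers_connected(num_positions):
--             return False
--     return True
--
-- def is_numbers_connected(num_positions):
--     # 这里我觉得很精髓的地方是`range(1, len(num_positions))`,因为是相邻两个数相比,所以最后一个数没办法和后一个比较,从`1`开始索引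
--     # 如果字符串中只有一个数字,那么`range(1, len(num_positions))`是空列表
--     return all(num_positions[i] - num_positions[i - 1] == 1 for i in range(1, len(num_positions)))
-- ===== SOURCE B (Python) =====
-- def check_number_position(s):
--     for i, c in enumerate(s):
--         if c.isdigit():
--             return c != "0" and s[i:].isdigit()
--     return True
-- ===== Notes on version B (the rewrite author's own statement) =====
-- stated objective: simpler
-- what changed: Instead of collecting every digit position and then checking first char, last-position-at-end and pairwise adjacency via a helper, B scans once to the first digit and returns whether that digit is nonzero and the remaining suffix consists entirely of digits (True when the string has no digit).
import Mathlib
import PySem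

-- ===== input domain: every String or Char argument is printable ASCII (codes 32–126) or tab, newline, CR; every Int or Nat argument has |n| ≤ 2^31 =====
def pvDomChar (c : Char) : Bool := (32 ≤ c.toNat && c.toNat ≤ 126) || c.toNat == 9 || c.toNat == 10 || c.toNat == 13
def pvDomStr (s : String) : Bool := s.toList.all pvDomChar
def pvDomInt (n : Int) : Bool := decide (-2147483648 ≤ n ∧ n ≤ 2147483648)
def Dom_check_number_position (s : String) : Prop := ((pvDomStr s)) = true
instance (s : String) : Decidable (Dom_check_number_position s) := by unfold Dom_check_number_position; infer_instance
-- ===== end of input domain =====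

-- B replaces A's "collect all digit positions, then check first char / last-at-end / adjacency"
-- with "find the first digit, then check it is not '0' and the suffix is all digits" (simpler decomposition).

-- ===== PORT A =====
def is_numbers_connected (num_positions : List Int) : Bool :=
  (PySem.List.pyRange 1 (num_positions.length : Int) 1).all
    (fun i => PySem.List.pyGetD num_positions i 0 - PySem.List.pyGetD num_positions (i - 1) 0 == 1)

def check_number_position_list (cs : List Char) : Bool :=
  let num_positions := ((PySem.List.enumerate cs).filter (fun p => PySem.Chars.isdigit p.2)).map (·.1)
  if !num_positions.isEmpty then
    let first_num_pos := PySem.List.pyGetD num_positions 0 0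
    let last_num_pos := PySem.List.pyGetD num_positions (-1) 0
    if PySem.List.pyGetD cs first_num_pos ' ' == '0'
        || !(last_num_pos == (cs.length : Int) - 1)
        || !is_numbers_connected num_positions then false
    else true
  else true

def check_number_position (s : String) : Bool := check_number_position_list s.toList

-- ===== PORT B =====
def cnpAltGo : List Char → Bool
  | [] => true
  | c :: rest =>
    if PySem.Chars.isdigit c then
      (c != '0') && PySem.Chars.strIsdigit (c :: rest)   -- s[i:] is the current suffix
    else cnpAltGo rest

def check_number_position_alt (s : String) : Bool := cnpAltGo s.toList

-- ===== PRECONDITION & SPEC =====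
def Spec_check_number_position (s : String) (out : Bool) : Prop := out = check_number_position_alt s
instance (s : String) (out : Bool) : Decidable (Spec_check_number_position s out) := by unfold Spec_check_number_position; infer_instance

-- ===== CLAIM (what is proved, stated in full; the proofs are below) =====
def Claim_equal_check_number_position : Prop := ∀ (s : String), Dom_check_number_position s → Spec_check_number_position s (check_number_position s)

-- ===== LEMMAS AND PROOFS =====

-- the list of digit positions that A computes, as a function of the char list
def dIdx (cs : List Char) : List Int :=
  ((PySem.List.enumerate cs).filter (fun p => PySem.Chars.isdigit p.2)).map (·.1)

theorem dIdx_shift (cs : List Char) : ∀ s : Int,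
    ((PySem.List.enumerate cs s).filter (fun p => PySem.Chars.isdigit p.2)).map (·.1)
      = (dIdx cs).map (· + s) := by
  induction cs with
  | nil => intro s; simp [dIdx, PySem.List.enumerate]
  | cons c cs ih =>
    intro s
    have hf : ∀ t : Int, ((· + t) ∘ (· + (1 : Int))) = (fun x : Int => x + (t + 1)) := by
      intro t; funext x; simp; ring
    by_cases hc : PySem.Chars.isdigit c
    · simp only [dIdx, PySem.List.enumerate_cons, List.filter_cons, hc, if_pos, zero_add]
      simp only [List.map_cons, ih (s + 1), ih 1, List.map_map, hf, zero_add]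
    · simp only [dIdx, PySem.List.enumerate_cons, List.filter_cons, hc]
      simp only [Bool.false_eq_true, if_false, ih (s + 1), ih 1, List.map_map, hf, zero_add]

theorem dIdx_cons (c : Char) (cs : List Char) :
    dIdx (c :: cs) = if PySem.Chars.isdigit c then 0 :: (dIdx cs).map (· + 1)
                     else (dIdx cs).map (· + 1) := by
  by_cases hc : PySem.Chars.isdigit c
  · simp only [dIdx, PySem.List.enumerate_cons, List.filter_cons, hc, if_pos, zero_add]
    simp only [List.map_cons, dIdx_shift cs 1, if_pos, hc]
    rfl
  · simp only [dIdx, PySem.List.enumerate_cons, List.filter_cons, hc]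
    simp only [Bool.false_eq_true, if_false, dIdx_shift cs 1, zero_add]
    rfl

theorem dIdx_cons_digit {c : Char} (cs : List Char) (hc : PySem.Chars.isdigit c = true) :
    dIdx (c :: cs) = 0 :: (dIdx cs).map (· + 1) := by
  rw [dIdx_cons, if_pos hc]

theorem dIdx_cons_nondigit {c : Char} (cs : List Char) (hc : PySem.Chars.isdigit c = false) :
    dIdx (c :: cs) = (dIdx cs).map (· + 1) := by
  rw [dIdx_cons, if_neg (by simp [hc])]

theorem mem_dIdx {cs : List Char} {x : Int} :
    x ∈ dIdx cs ↔ ∃ (k : Nat) (h : k < cs.length), x = (k : Int) ∧ PySem.Chars.isdigit cs[k] := by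
  simp only [dIdx, List.mem_map, List.mem_filter, PySem.List.mem_enumerate_iff]
  constructor
  · rintro ⟨p, ⟨⟨k, hk, rfl⟩, hd⟩, rfl⟩
    exact ⟨k, hk, by simp, by simpa using hd⟩
  · rintro ⟨k, hk, rfl, hd⟩
    exact ⟨((0 : Int) + (k : Int), cs[k]), ⟨⟨k, hk, rfl⟩, by simpa using hd⟩, by simp⟩

theorem conn_iff (l : List Int) :
    is_numbers_connected l = true ↔ l.IsChain (fun a b => b = a + 1) := by
  unfold is_numbers_connected
  rw [List.all_eq_true, List.isChain_iff_getElem]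
  constructor
  · intro h i hi
    have hm : ((i : Int) + 1) ∈ PySem.List.pyRange 1 (l.length : Int) 1 := by
      rw [PySem.List.mem_pyRange_one]; omega
    have hx := h _ hm
    rw [beq_iff_eq] at hx
    rw [PySem.List.pyGetD_eq_getElem l 0 (by omega) (by push_cast; omega),
        PySem.List.pyGetD_eq_getElem l 0 (by omega) (by push_cast; omega)] at hx
    have h1 : ((i : Int) + 1).toNat = i + 1 := by omega
    have h2 : ((i : Int) + 1 - 1).toNat = i := by omega
    simp only [h1, h2] at hx
    omega
  · intro h i hm
    rw [PySem.List.mem_pyRange_one] at hm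
    obtain ⟨k, hk⟩ : ∃ k : Nat, i = (k : Int) + 1 := ⟨(i - 1).toNat, by omega⟩
    subst hk
    have hlt : k + 1 < l.length := by omega
    have hx := h k hlt
    rw [beq_iff_eq]
    rw [PySem.List.pyGetD_eq_getElem l 0 (by omega) (by push_cast; omega),
        PySem.List.pyGetD_eq_getElem l 0 (by omega) (by push_cast; omega)]
    have h1 : ((k : Int) + 1).toNat = k + 1 := by omega
    have h2 : ((k : Int) + 1 - 1).toNat = k := by omega
    simp only [h1, h2]
    omega

theorem chain_arith : ∀ (t : List Int) (a : Int),
    (a :: t).IsChain (fun x y => y = x + 1) →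
    a :: t = (List.range (t.length + 1)).map (fun k : Nat => a + (k : Int)) := by
  intro t
  induction t with
  | nil => intro a _; simp
  | cons b t ih =>
    intro a h
    rw [List.isChain_cons_cons] at h
    obtain ⟨hab, hch⟩ := h
    have hrec := ih b hch
    rw [List.length_cons, List.range_succ_eq_map]
    simp only [List.map_cons, List.map_map]
    refine List.cons_eq_cons.mpr ⟨by simp, ?_⟩
    rw [hrec]
    apply List.map_congr_left
    intro k _
    simp only [Function.comp_def]
    push_cast
    omega

theorem isChain_map_range (n : Nat) (a : Int) :
    ((List.range n).map (fun k : Nat => a + (k : Int))).IsChain (fun x y => y = x + 1) := by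
  rw [List.isChain_iff_getElem]
  intro i hi
  simp only [List.length_map, List.length_range] at hi
  simp only [List.getElem_map, List.getElem_range]
  push_cast
  ring

theorem getLast_map_range (n : Nat) (f : Nat → Int)
    (h : ((List.range (n + 1)).map f) ≠ []) :
    ((List.range (n + 1)).map f).getLast h = f n := by
  rw [List.getLast_eq_getElem]
  simp

theorem all_digits_dIdx (cs : List Char) (h : cs.all PySem.Chars.isdigit = true) :
    dIdx cs = (List.range cs.length).map (fun k : Nat => (k : Int)) := by
  induction cs with
  | nil => simp [dIdx, PySem.List.enumerate]
  | cons c cs ih =>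
    simp only [List.all_cons, Bool.and_eq_true] at h
    rw [dIdx_cons, if_pos h.1, ih h.2, List.length_cons, List.range_succ_eq_map]
    simp only [List.map_cons, List.map_map]
    refine List.cons_eq_cons.mpr ⟨by simp, ?_⟩
    apply List.map_congr_left
    intro k _
    simp only [Function.comp_def]
    push_cast
    ring

theorem key (rest : List Char) :
    ((PySem.List.pyGetD (0 :: (dIdx rest).map (· + 1)) (-1) 0 == (rest.length : Int)) &&
      is_numbers_connected (0 :: (dIdx rest).map (· + 1))) = rest.all PySem.Chars.isdigit := by
  by_cases hall : rest.all PySem.Chars.isdigit = true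
  · -- all digits: both sides are true
    rw [hall, all_digits_dIdx rest hall]
    have hrange : (0 : Int) :: ((List.range rest.length).map (fun k : Nat => (k : Int))).map (· + 1)
        = (List.range (rest.length + 1)).map (fun k : Nat => (0 : Int) + (k : Int)) := by
      rw [List.range_succ_eq_map]
      simp only [List.map_cons, List.map_map]
      refine List.cons_eq_cons.mpr ⟨by simp, ?_⟩
      apply List.map_congr_left
      intro k _
      simp only [Function.comp_def]
      push_cast
      ring
    rw [hrange, Bool.and_eq_true, beq_iff_eq]
    refine ⟨?_, ?_⟩
    · rw [PySem.List.pyGetD_neg_one _ _ (by simp), getLast_map_range]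
      simp
    · rw [conn_iff]
      exact isChain_map_range _ _
  · -- some non-digit: if A's two checks both held, every position would be a digit
    have himp : ((PySem.List.pyGetD (0 :: (dIdx rest).map (· + 1)) (-1) 0 == (rest.length : Int)) &&
        is_numbers_connected (0 :: (dIdx rest).map (· + 1))) = true →
        rest.all PySem.Chars.isdigit = true := by
      intro hb
      rw [Bool.and_eq_true, beq_iff_eq] at hb
      obtain ⟨hlast, hconn⟩ := hb
      rw [conn_iff] at hconn
      have harith := chain_arith _ _ hconn
      have hne' : ((0 : Int) :: (dIdx rest).map (· + 1)) ≠ [] := by simp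
      rw [PySem.List.pyGetD_neg_one _ _ hne'] at hlast
      have hlast2 : some ((0 : Int) :: (dIdx rest).map (· + 1)).getLast? = some (some ((rest.length : Int))) := by
        rw [List.getLast?_eq_some_getLast hne', hlast]
      have hlenm : ((dIdx rest).map (· + (1 : Int))).length = (dIdx rest).length := by simp
      have hlast3 : ((0 : Int) :: (dIdx rest).map (· + 1)).getLast? = some (((dIdx rest).length : Int)) := by
        rw [harith, List.getLast?_eq_some_getLast (by simp), getLast_map_range]
        simp [hlenm]
      rw [hlast3] at hlast2
      have hmn : (dIdx rest).length = rest.length := by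
        have := Option.some.inj (Option.some.inj hlast2)
        omega
      have hdig : ∀ k : Nat, ∀ _ : k < rest.length, PySem.Chars.isdigit rest[k] = true := by
        intro k hk
        have hmem : ((k : Int) + 1) ∈ ((0 : Int) :: (dIdx rest).map (· + 1)) := by
          rw [harith]
          simp only [List.mem_map, List.mem_range]
          exact ⟨k + 1, by simp [hlenm]; omega, by push_cast; ring⟩
        have hmem2 : (k : Int) ∈ dIdx rest := by
          rcases List.mem_cons.mp hmem with h0 | hmem
          · omega
          · rw [List.mem_map] at hmem
            obtain ⟨x, hx, hxe⟩ := hmem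
            have hxk : x = (k : Int) := by omega
            rwa [← hxk]
        rw [mem_dIdx] at hmem2
        obtain ⟨j, hj, hje, hjd⟩ := hmem2
        have hjk : j = k := by omega
        subst hjk
        exact hjd
      rw [List.all_eq_true]
      intro x hx
      obtain ⟨k, hk, rfl⟩ := List.mem_iff_getElem.mp hx
      exact hdig k hk
    rw [Bool.not_eq_true] at hall
    rw [hall]
    cases hL : ((PySem.List.pyGetD (0 :: (dIdx rest).map (· + 1)) (-1) 0 == (rest.length : Int)) &&
        is_numbers_connected (0 :: (dIdx rest).map (· + 1)))
    · rfl
    · rw [himp hL] at hall; exact absurd hall (by simp)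

theorem cnpl_eq (cs : List Char) : check_number_position_list cs =
    (if !(dIdx cs).isEmpty then
      (if PySem.List.pyGetD cs (PySem.List.pyGetD (dIdx cs) 0 0) ' ' == '0'
          || !(PySem.List.pyGetD (dIdx cs) (-1) 0 == (cs.length : Int) - 1)
          || !is_numbers_connected (dIdx cs) then false else true)
    else true) := rfl

theorem mainAB : ∀ cs : List Char, check_number_position_list cs = cnpAltGo cs := by
  intro cs
  induction cs with
  | nil =>
    rw [cnpl_eq]
    simp [dIdx, PySem.List.enumerate, cnpAltGo]
  | cons c rest ih =>
    by_cases hc : PySem.Chars.isdigit c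
    · -- first character is a digit
      rw [cnpl_eq, dIdx_cons_digit rest hc]
      have hfirst : PySem.List.pyGetD ((0 : Int) :: (dIdx rest).map (· + 1)) 0 0 = 0 :=
        PySem.List.pyGetD_zero_cons _ _ _
      have hchar : PySem.List.pyGetD (c :: rest) 0 ' ' = c := PySem.List.pyGetD_zero_cons _ _ _
      have hkey := key rest
      simp only [List.isEmpty_cons, Bool.not_false, if_true, hfirst, hchar, List.length_cons]
      have hlen : ((rest.length + 1 : Nat) : Int) - 1 = (rest.length : Int) := by push_cast; omega
      rw [hlen]
      rw [cnpAltGo, if_pos hc]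
      have hsd : PySem.Chars.strIsdigit (c :: rest) = rest.all PySem.Chars.isdigit := by
        simp [PySem.Chars.strIsdigit, hc]
      rw [hsd, ← hkey]
      cases h0 : (c == '0')
      · have hne0 : (c != '0') = true := by simp_all
        rw [hne0]
        cases hL : (PySem.List.pyGetD ((0 : Int) :: (dIdx rest).map (· + 1)) (-1) 0 == (rest.length : Int)) <;>
          cases hC : is_numbers_connected ((0 : Int) :: (dIdx rest).map (· + 1)) <;> simp [hL, hC]
      · have hne0 : (c != '0') = false := by simp_all
        rw [hne0]
        simp
    · -- first character is not a digit: both sides step to `rest`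
      have hcf : PySem.Chars.isdigit c = false := by simpa using hc
      rw [cnpl_eq, dIdx_cons_nondigit rest hcf, cnpAltGo, if_neg hc, ← ih, cnpl_eq rest]
      rcases hd : dIdx rest with _ | ⟨x, t⟩
      · simp
      · have hxmem : x ∈ dIdx rest := by rw [hd]; exact List.mem_cons_self
        rw [mem_dIdx] at hxmem
        obtain ⟨k, hk, hxk, hkd⟩ := hxmem
        subst hxk
        rw [← hd]
        have hneA : (dIdx rest).map (· + (1 : Int)) ≠ [] := by rw [hd]; simp
        have hneB : dIdx rest ≠ [] := by rw [hd]; simp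
        have hfirstA : PySem.List.pyGetD ((dIdx rest).map (· + 1)) 0 0 = (k : Int) + 1 := by
          rw [hd]
          simp only [List.map_cons]
          exact PySem.List.pyGetD_zero_cons _ _ _
        have hfirstB : PySem.List.pyGetD (dIdx rest) 0 0 = (k : Int) := by
          rw [hd]
          exact PySem.List.pyGetD_zero_cons _ _ _
        have hcharEq : PySem.List.pyGetD (c :: rest) ((k : Int) + 1) ' ' = PySem.List.pyGetD rest (k : Int) ' ' := by
          rw [PySem.List.pyGetD_eq_getElem _ _ (by omega) (by simp; push_cast; omega),
              PySem.List.pyGetD_eq_getElem _ _ (by omega) (by push_cast; omega)]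
          have h1 : ((k : Int) + 1).toNat = k + 1 := by omega
          have h2 : ((k : Int)).toNat = k := by omega
          simp only [h1, h2]
          simp
        have hgl : ((dIdx rest).map (· + 1)).getLast hneA = (dIdx rest).getLast hneB + 1 := by
          have hm := List.getLast?_map (f := (· + (1 : Int))) (l := dIdx rest)
          rw [List.getLast?_eq_some_getLast hneA, List.getLast?_eq_some_getLast hneB] at hm
          simpa using hm
        have hlastEq : (PySem.List.pyGetD ((dIdx rest).map (· + 1)) (-1) 0 == ((c :: rest).length : Int) - 1)
            = (PySem.List.pyGetD (dIdx rest) (-1) 0 == (rest.length : Int) - 1) := by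
          rw [PySem.List.pyGetD_neg_one _ _ hneA, PySem.List.pyGetD_neg_one _ _ hneB, hgl]
          rw [Bool.eq_iff_iff, beq_iff_eq, beq_iff_eq]
          simp only [List.length_cons]
          push_cast
          constructor <;> intro h <;> omega
        have hconnEq : is_numbers_connected ((dIdx rest).map (· + 1)) = is_numbers_connected (dIdx rest) := by
          rw [Bool.eq_iff_iff, conn_iff, conn_iff, List.isChain_map]
          constructor
          · intro h; exact h.imp (fun hab => by omega)
          · intro h; exact h.imp (fun hab => by omega)
        have hie : ((dIdx rest).map (· + (1 : Int))).isEmpty = (dIdx rest).isEmpty := by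
          rw [hd]; simp
        rw [hfirstA, hfirstB, hcharEq, hlastEq, hconnEq, hie]

-- ===== VERDICT (by name: the statement is the Claim_ definition above) =====
theorem check_number_position_spec : Claim_equal_check_number_position := by
  intro s _
  unfold Spec_check_number_position check_number_position check_number_position_alt
  exact mainAB s.toList
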